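-- pv_equiv track=rewrite | github.com/y1141335509/6515Exams | HW5/hw5/cs6515_friendly_competition.py | FriendlyCompetition
-- ===== SOURCE A (Python) =====
-- def FriendlyCompetition(A: list[int]) -> int:
--     def merge_sort_count(subarr: list[int]) -> tuple[int, int]:
--         if len(subarr) <= 1:
--             return subarr, 0
--         mid = len(subarr) // 2
--         left, left_count = merge_sort_count(subarr[:mid])
--         right, right_count = merge_sort_count(subarr[mid:])
--         merged, merge_count = merge_and_count(left, right)
--         return merged, left_count + right_count + merge_count
--
--     def merge_and_count(left: list[int], right: list[int]) -> tuple[list[int], int]: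
--         count = 0
--         merged = []
--         i, j = 0, 0
--         while i < len(left) and j < len(right):
--             if left[i] < right[j]:
--                 count += len(right) - j
--                 merged.append(left[i])
--                 i += 1
--             else:
--                 merged.append(right[j])
--                 j += 1
--         merged += left[i:]
--         merged += right[j:]
--         return merged, count
--     _, total_count = merge_sort_count(A)
--     return total_count
-- ===== SOURCE B (Python) =====
-- def FriendlyCompetition(A: list[int]) -> int:
--     # Count pairs i < j with A[i] < A[j] directly: peel the first element,
--     # compare it with everything after it, repeat on the rest.
--     count = 0
--     rest = A
--     while rest:
--         x, rest = rest[0], rest[1:]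
--         for y in rest:
--             if x < y:
--                 count += 1
--     return count
-- ===== Notes on version B (the rewrite author's own statement) =====
-- stated objective: simpler
-- what changed: Replaces the divide-and-conquer merge-sort pair counting with a plain peel-the-head nested scan that keeps only a running counter (no sorting, no merging).
import Mathlib
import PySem

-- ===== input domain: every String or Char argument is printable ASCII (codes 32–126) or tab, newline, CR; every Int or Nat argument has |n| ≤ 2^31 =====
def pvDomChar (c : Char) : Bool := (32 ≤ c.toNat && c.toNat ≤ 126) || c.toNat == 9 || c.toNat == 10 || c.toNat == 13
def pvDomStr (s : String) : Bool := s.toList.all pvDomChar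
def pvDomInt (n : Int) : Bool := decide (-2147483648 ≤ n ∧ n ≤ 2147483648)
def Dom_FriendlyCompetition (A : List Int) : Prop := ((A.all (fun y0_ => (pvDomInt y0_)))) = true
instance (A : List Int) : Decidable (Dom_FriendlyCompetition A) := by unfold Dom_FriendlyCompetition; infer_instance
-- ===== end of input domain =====

-- B replaces merge-sort pair counting by a direct peel-the-head nested scan (simpler, not faster).

-- ===== PORT A =====
-- merge_and_count: the while loop consumes the fronts of left/right; 'count += len(right) - j'
-- is the length of the remaining right part.
def pvMergeCount : List Int → List Int → List Int × Int
  | [], r => (r, 0)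
  | a :: l, [] => (a :: l, 0)
  | a :: l, b :: r =>
    if a < b then
      let m := pvMergeCount l (b :: r)
      (a :: m.1, m.2 + ((b :: r).length : Int))
    else
      let m := pvMergeCount (a :: l) r
      (b :: m.1, m.2)

-- merge_sort_count: recursion on the two slices subarr[:mid] and subarr[mid:].
def pvMSC (subarr : List Int) : List Int × Int :=
  if h : subarr.length ≤ 1 then (subarr, 0)
  else
    let mid := subarr.length / 2
    let L := pvMSC (PySem.List.slice subarr none (some (mid : Int)))
    let R := pvMSC (PySem.List.slice subarr (some (mid : Int)) none)
    let M := pvMergeCount L.1 R.1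
    (M.1, L.2 + R.2 + M.2)
termination_by subarr.length
decreasing_by
  · rw [PySem.List.slice_to_natCast]; simp [List.length_take]; omega
  · rw [PySem.List.slice_from_natCast]; simp [List.length_drop]; omega

def FriendlyCompetition (A : List Int) : Int := (pvMSC A).2

-- ===== PORT B =====
-- the while loop: peel the head, count heads beaten by a later element, recurse on the rest.
def pvAltLoop : List Int → Int → Int
  | [], count => count
  | x :: rest, count =>
      pvAltLoop rest (rest.foldl (fun c y => if x < y then c + 1 else c) count)

def FriendlyCompetition_alt (A : List Int) : Int := pvAltLoop A 0

-- ===== PRECONDITION & SPEC =====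
def Spec_FriendlyCompetition (A : List Int) (out : Int) : Prop := out = FriendlyCompetition_alt A
instance (A : List Int) (out : Int) : Decidable (Spec_FriendlyCompetition A out) := by unfold Spec_FriendlyCompetition; infer_instance

-- ===== CLAIM (what is proved, stated in full; the proofs are below) =====
def Claim_equal_FriendlyCompetition : Prop := ∀ (A : List Int), Dom_FriendlyCompetition A → Spec_FriendlyCompetition A (FriendlyCompetition A)

-- ===== LEMMAS AND PROOFS =====

-- number of elements of r strictly greater than x
def pvCnt (x : Int) (r : List Int) : Int := ((r.countP (fun y => decide (x < y)) : Nat) : Int)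

-- number of pairs i < j with xs[i] < xs[j]
def pvInv : List Int → Int
  | [] => 0
  | x :: rest => pvCnt x rest + pvInv rest

-- number of cross pairs (x from l, y from r) with x < y
def pvCross (l r : List Int) : Int := (l.map (fun x => pvCnt x r)).sum

theorem pvCnt_cons (x b : Int) (r : List Int) :
    pvCnt x (b :: r) = (if x < b then 1 else 0) + pvCnt x r := by
  by_cases h : x < b <;> simp [pvCnt, List.countP_cons, h] <;> omega

theorem pvCnt_append (x : Int) (r s : List Int) :
    pvCnt x (r ++ s) = pvCnt x r + pvCnt x s := by
  simp [pvCnt, List.countP_append]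

theorem pvCnt_perm (x : Int) {r r' : List Int} (h : r.Perm r') : pvCnt x r = pvCnt x r' := by
  simp [pvCnt, h.countP_eq]

theorem pvCross_perm {l l' r r' : List Int} (hl : l.Perm l') (hr : r.Perm r') :
    pvCross l r = pvCross l' r' := by
  unfold pvCross
  have h1 : ∀ m : List Int, m.map (fun x => pvCnt x r) = m.map (fun x => pvCnt x r') := by
    intro m; exact List.map_congr_left (fun x _ => pvCnt_perm x hr)
  rw [h1]
  exact (hl.map (fun x => pvCnt x r')).sum_eq

theorem pvInv_append (l r : List Int) :
    pvInv (l ++ r) = pvInv l + pvInv r + pvCross l r := by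
  induction l with
  | nil => simp [pvInv, pvCross]
  | cons x l ih =>
      simp only [List.cons_append, pvInv, ih, pvCnt_append, pvCross, List.map_cons, List.sum_cons]
      ring

theorem pvAltLoop_foldl (x : Int) (rest : List Int) (c : Int) :
    rest.foldl (fun c y => if x < y then c + 1 else c) c = c + pvCnt x rest := by
  induction rest generalizing c with
  | nil => simp [pvCnt]
  | cons y rest ih =>
      simp only [List.foldl_cons, ih, pvCnt_cons]
      split_ifs <;> ring

theorem pvAltLoop_eq (rest : List Int) (c : Int) : pvAltLoop rest c = c + pvInv rest := by
  induction rest generalizing c with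
  | nil => simp [pvAltLoop, pvInv]
  | cons x rest ih => simp only [pvAltLoop, pvAltLoop_foldl, ih, pvInv]; ring

-- merge lemma: on sorted inputs, merge returns a sorted permutation of l ++ r and counts the cross pairs
theorem pvMergeCount_spec : ∀ (l r : List Int),
    l.Pairwise (· ≤ ·) → r.Pairwise (· ≤ ·) →
    (pvMergeCount l r).1.Perm (l ++ r) ∧ (pvMergeCount l r).1.Pairwise (· ≤ ·) ∧
      (pvMergeCount l r).2 = pvCross l r
  | [], r, _, hr => by simp [pvMergeCount, pvCross, hr]
  | a :: l, [], hl, _ => by simp [pvMergeCount, pvCross, pvCnt, hl]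
  | a :: l, b :: r, hl, hr => by
      rw [pvMergeCount]
      by_cases hab : a < b
      · have ih := pvMergeCount_spec l (b :: r) (List.Pairwise.of_cons hl) hr
        simp only [if_pos hab]
        refine ⟨(ih.1.cons a).trans (List.Perm.refl _), ?_, ?_⟩
        · refine List.pairwise_cons.2 ⟨?_, ih.2.1⟩
          intro y hy
          have hy' : y ∈ l ++ (b :: r) := ih.1.mem_iff.mp hy
          rcases List.mem_append.1 hy' with h | h
          · exact List.rel_of_pairwise_cons hl h
          · rcases List.mem_cons.1 h with rfl | h
            · exact le_of_lt hab
            · exact le_trans (le_of_lt hab) (List.rel_of_pairwise_cons hr h)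
        · have hcnt : pvCnt a (b :: r) = ((b :: r).length : Int) := by
            unfold pvCnt
            have : (b :: r).countP (fun y => decide (a < y)) = (b :: r).length := by
              apply List.countP_eq_length.2
              intro y hy
              rcases List.mem_cons.1 hy with rfl | hy
              · simpa using hab
              · simpa using lt_of_lt_of_le hab (List.rel_of_pairwise_cons hr hy)
            rw [this]
          simp only [ih.2.2, pvCross, List.map_cons, List.sum_cons, hcnt]
          ring
      · have ih := pvMergeCount_spec (a :: l) r hl (List.Pairwise.of_cons hr)
        simp only [if_neg hab]
        have hperm : (b :: (pvMergeCount (a :: l) r).1).Perm (a :: l ++ b :: r) := by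
          have h2 := ih.1.cons b
          exact h2.trans (List.perm_middle (a := b) (l₁ := a :: l) (l₂ := r)).symm
        refine ⟨hperm, ?_, ?_⟩
        · refine List.pairwise_cons.2 ⟨?_, ih.2.1⟩
          intro y hy
          have hy' : y ∈ (a :: l) ++ r := ih.1.mem_iff.mp hy
          have hba : b ≤ a := le_of_not_gt hab
          rcases List.mem_append.1 hy' with h | h
          · rcases List.mem_cons.1 h with rfl | h
            · exact hba
            · exact le_trans hba (List.rel_of_pairwise_cons hl h)
          · exact List.rel_of_pairwise_cons hr h
        · -- no element of a :: l is < b, so dropping b changes no cross count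
          rw [ih.2.2]
          unfold pvCross
          apply congrArg
          apply List.map_congr_left
          intro x hx
          have hbx : b ≤ x := by
            rcases List.mem_cons.1 hx with rfl | hx
            · exact le_of_not_gt hab
            · exact le_trans (le_of_not_gt hab) (List.rel_of_pairwise_cons hl hx)
          rw [pvCnt_cons, if_neg (by omega)]
          ring_nf

theorem pvMSC_spec : ∀ (xs : List Int),
    (pvMSC xs).1.Perm xs ∧ (pvMSC xs).1.Pairwise (· ≤ ·) ∧ (pvMSC xs).2 = pvInv xs := by
  intro xs
  induction hn : xs.length using Nat.strong_induction_on generalizing xs with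
  | _ n ih =>
    subst hn
    rw [pvMSC]
    by_cases h : xs.length ≤ 1
    · rw [dif_pos h]
      interval_cases hl : xs.length
      · obtain rfl : xs = [] := List.length_eq_zero_iff.1 hl
        simp [pvInv]
      · obtain ⟨a, rfl⟩ : ∃ a, xs = [a] := List.length_eq_one_iff.1 hl
        simp [pvInv, pvCnt]
    · rw [dif_neg h]
      set mid := xs.length / 2 with hmid
      have hsl : PySem.List.slice xs none (some (mid : Int)) = xs.take mid :=
        PySem.List.slice_to_natCast xs mid
      have hsr : PySem.List.slice xs (some (mid : Int)) none = xs.drop mid :=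
        PySem.List.slice_from_natCast xs mid
      have hlt1 : (xs.take mid).length < xs.length := by
        simp [List.length_take]; omega
      have hlt2 : (xs.drop mid).length < xs.length := by
        simp [List.length_drop]; omega
      have ihL := ih (PySem.List.slice xs none (some (mid : Int))).length
        (by rw [hsl]; exact hlt1) _ rfl
      have ihR := ih (PySem.List.slice xs (some (mid : Int)) none).length
        (by rw [hsr]; exact hlt2) _ rfl
      have hm := pvMergeCount_spec _ _ ihL.2.1 ihR.2.1
      have hLp : (pvMSC (PySem.List.slice xs none (some (mid : Int)))).1.Perm (xs.take mid) := by
        rw [hsl] at ihL ⊢; exact ihL.1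
      have hRp : (pvMSC (PySem.List.slice xs (some (mid : Int)) none)).1.Perm (xs.drop mid) := by
        rw [hsr] at ihR ⊢; exact ihR.1
      refine ⟨?_, hm.2.1, ?_⟩
      · exact hm.1.trans ((hLp.append hRp).trans (by rw [List.take_append_drop]))
      · have hcross : (pvMergeCount (pvMSC (PySem.List.slice xs none (some (mid : Int)))).1
            (pvMSC (PySem.List.slice xs (some (mid : Int)) none)).1).2
            = pvCross (xs.take mid) (xs.drop mid) := by
          rw [hm.2.2]; exact pvCross_perm hLp hRp
        have hinv : pvInv xs = pvInv (xs.take mid) + pvInv (xs.drop mid)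
            + pvCross (xs.take mid) (xs.drop mid) := by
          conv_lhs => rw [← List.take_append_drop mid xs]
          exact pvInv_append _ _
        have hfin : (pvMSC (PySem.List.slice xs none (some (mid : Int)))).2
            + (pvMSC (PySem.List.slice xs (some (mid : Int)) none)).2
            + (pvMergeCount (pvMSC (PySem.List.slice xs none (some (mid : Int)))).1
                (pvMSC (PySem.List.slice xs (some (mid : Int)) none)).1).2 = pvInv xs := by
          rw [hcross, ihL.2.2, ihR.2.2, hsl, hsr, hinv]
        exact hfin

-- ===== VERDICT (by name: the statement is the Claim_ definition above) =====
theorem FriendlyCompetition_spec : Claim_equal_FriendlyCompetition := by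
  intro A _
  unfold Spec_FriendlyCompetition FriendlyCompetition FriendlyCompetition_alt
  rw [(pvMSC_spec A).2.2, pvAltLoop_eq]
  ring
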